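-- pv_equiv track=rewrite | github.com/kr4g/Klotho | klotho/chronos/rhythm_pairs/rhythm_pair.py | _partition_sequence
-- ===== SOURCE A (Python) =====
-- from typing import Tuple
--
-- def _partition_sequence(sequence: Tuple[int, ...], partition_value: int) -> Tuple[int, Tuple[int, ...]]:
--     partitions = []
--     current_partition = []
--     current_sum = 0
--
--     for value in sequence:
--         current_partition.append(value)
--         current_sum += value
--
--         if current_sum == partition_value:
--             partitions.append((partition_value, tuple(current_partition)))
--             current_partition = []
--             current_sum = 0
--
--     return tuple(partitions)
-- ===== SOURCE B (Python) =====
-- def _partition_sequence(sequence, partition_value):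
--     def first_group(seq):
--         # return (group, rest) for the shortest prefix summing exactly to
--         # partition_value, or None if no prefix sum ever hits it
--         s = 0
--         for i, v in enumerate(seq):
--             s += v
--             if s == partition_value:
--                 return seq[:i + 1], seq[i + 1:]
--         return None
--
--     out = []
--     seq = tuple(sequence)
--     while True:
--         g = first_group(seq)
--         if g is None:
--             return tuple(out)
--         out.append((partition_value, g[0]))
--         seq = g[1]
-- ===== Notes on version B (the rewrite author's own statement) =====
-- stated objective: alternative
-- what changed: B repeatedly extracts the shortest prefix summing to partition_value with a helper and loops on the untouched suffix, instead of A's single fold carrying a running partition/sum state that resets on exact hits.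
import Mathlib
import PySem

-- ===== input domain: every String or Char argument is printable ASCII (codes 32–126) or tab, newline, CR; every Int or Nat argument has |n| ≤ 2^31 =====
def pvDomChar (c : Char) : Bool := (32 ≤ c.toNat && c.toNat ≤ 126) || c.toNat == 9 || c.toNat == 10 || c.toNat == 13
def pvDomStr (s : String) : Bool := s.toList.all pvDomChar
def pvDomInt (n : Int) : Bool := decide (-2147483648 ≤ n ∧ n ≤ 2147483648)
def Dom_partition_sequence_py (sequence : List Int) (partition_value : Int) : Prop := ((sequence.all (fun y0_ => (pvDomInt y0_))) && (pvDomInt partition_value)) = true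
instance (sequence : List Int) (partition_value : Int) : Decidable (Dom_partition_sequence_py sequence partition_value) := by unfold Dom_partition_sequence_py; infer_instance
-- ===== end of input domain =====

-- B replaces A's single fold (running partition + running sum, reset on exact hits) by a
-- helper that splits off the shortest prefix summing to partition_value and recursion on
-- the suffix; same cost, proved equal on all inputs.

-- ===== PORT A =====
-- one fold step: append value to current partition, add to running sum,
-- and on an exact hit flush (partition_value, current) into the result.
def pvAStep (pv : Int) (st : List (Int × List Int) × List Int × Int) (v : Int) :
    List (Int × List Int) × List Int × Int :=
  let cur := st.2.1 ++ [v]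
  let s := st.2.2 + v
  if s = pv then (st.1 ++ [(pv, cur)], ([], 0)) else (st.1, (cur, s))

def partition_sequence_py (sequence : List Int) (partition_value : Int) : List (Int × List Int) :=
  (sequence.foldl (pvAStep partition_value) ([], ([], 0))).1

-- ===== PORT B =====
-- first_group: shortest prefix (continuing accumulator acc with running sum s)
-- summing exactly to pv, together with the untouched suffix; none if no hit.
def pvFirstGroup (pv : Int) : List Int → Int → List Int → Option (List Int × List Int)
  | [], _, _ => none
  | v :: rest, s, acc =>
    if s + v = pv then some (acc ++ [v], rest)
    else pvFirstGroup pv rest (s + v) (acc ++ [v])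

theorem pvFirstGroup_rest_len (pv : Int) :
    ∀ (seq : List Int) (s : Int) (acc : List Int) (g rest : List Int),
      pvFirstGroup pv seq s acc = some (g, rest) → rest.length < seq.length := by
  intro seq
  induction seq with
  | nil => intro s acc g rest h; simp [pvFirstGroup] at h
  | cons v tl ih =>
    intro s acc g rest h
    simp only [pvFirstGroup] at h
    split at h
    · simp only [Option.some.injEq, Prod.mk.injEq] at h
      obtain ⟨-, h2⟩ := h
      simp [← h2]
    · have := ih (s + v) (acc ++ [v]) g rest h
      simp only [List.length_cons]
      omega

def partition_sequence_py_alt (sequence : List Int) (partition_value : Int) : List (Int × List Int) :=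
  match h : pvFirstGroup partition_value sequence 0 [] with
  | none => []
  | some (g, rest) => (partition_value, g) :: partition_sequence_py_alt rest partition_value
termination_by sequence.length
decreasing_by exact pvFirstGroup_rest_len _ _ _ _ _ _ h

-- ===== PRECONDITION & SPEC =====
def Spec_partition_sequence_py (sequence : List Int) (partition_value : Int) (out : List (Int × List Int)) : Prop := out = partition_sequence_py_alt sequence partition_value
instance (sequence : List Int) (partition_value : Int) (out : List (Int × List Int)) : Decidable (Spec_partition_sequence_py sequence partition_value out) := by unfold Spec_partition_sequence_py; infer_instance

-- ===== CLAIM (what is proved, stated in full; the proofs are below) =====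
def Claim_equal_partition_sequence_py : Prop := ∀ (sequence : List Int) (partition_value : Int), Dom_partition_sequence_py sequence partition_value → Spec_partition_sequence_py sequence partition_value (partition_sequence_py sequence partition_value)

-- ===== LEMMAS AND PROOFS =====

-- B's value when the scan continues from accumulator acc with running sum s
def pvAltFrom (pv : Int) (seq : List Int) (s : Int) (acc : List Int) : List (Int × List Int) :=
  match pvFirstGroup pv seq s acc with
  | none => []
  | some (g, rest) => (pv, g) :: partition_sequence_py_alt rest pv

theorem pvAlt_eq_altFrom (seq : List Int) (pv : Int) :
    partition_sequence_py_alt seq pv = pvAltFrom pv seq 0 [] := by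
  rw [partition_sequence_py_alt, pvAltFrom]
  rcases pvFirstGroup pv seq 0 [] with _ | ⟨g, rest⟩ <;> rfl

theorem pvFold_eq (pv : Int) :
    ∀ (seq : List Int) (P : List (Int × List Int)) (acc : List Int) (s : Int),
      (seq.foldl (pvAStep pv) (P, (acc, s))).1 = P ++ pvAltFrom pv seq s acc := by
  intro seq
  induction seq with
  | nil => intro P acc s; simp [pvAltFrom, pvFirstGroup]
  | cons v tl ih =>
    intro P acc s
    by_cases hv : s + v = pv
    · have : pvFirstGroup pv (v :: tl) s acc = some (acc ++ [v], tl) := by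
        simp [pvFirstGroup, hv]
      rw [List.foldl_cons]
      have hstep : pvAStep pv (P, (acc, s)) v = (P ++ [(pv, acc ++ [v])], ([], 0)) := by
        simp [pvAStep, hv]
      rw [hstep, ih]
      have h2 : pvAltFrom pv (v :: tl) s acc
          = (pv, acc ++ [v]) :: partition_sequence_py_alt tl pv := by
        rw [pvAltFrom, this]
      rw [h2, pvAlt_eq_altFrom]
      simp
    · have : pvFirstGroup pv (v :: tl) s acc = pvFirstGroup pv tl (s + v) (acc ++ [v]) := by
        simp [pvFirstGroup, hv]
      rw [List.foldl_cons]
      have hstep : pvAStep pv (P, (acc, s)) v = (P, (acc ++ [v], s + v)) := by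
        simp [pvAStep, hv]
      rw [hstep, ih]
      congr 1
      rw [pvAltFrom, pvAltFrom, this]

-- ===== VERDICT (by name: the statement is the Claim_ definition above) =====
theorem partition_sequence_py_spec : Claim_equal_partition_sequence_py := by
  intro seq pv _
  unfold Spec_partition_sequence_py partition_sequence_py
  rw [pvFold_eq, pvAlt_eq_altFrom]
  rfl
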